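-- pv_equiv track=rewrite | github.com/ourstorycomic/HOU-S-RIMS | API/main.py | apply_col_mapping
-- ===== SOURCE A (Python) =====
-- def apply_col_mapping(index, col_mapping):
--     """Return list of short display codes and list of full label strings."""
--     if not col_mapping:
--         return list(index), []
--     short_codes = []
--     legend_lines = []
--     used = set()
--     for v in index:
--         mapped = col_mapping.get(str(v))
--         code = str(v)
--         short_codes.append(code)
--         if mapped and str(v) not in used:
--             legend_lines.append(f"{code} = {mapped}")
--             used.add(str(v))
--     return short_codes, legend_lines
-- ===== SOURCE B (Python) =====
-- def apply_col_mapping(index, col_mapping):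
--     """Return list of short display codes and list of full label strings."""
--     if not col_mapping:
--         return list(index), []
--     short_codes = [str(v) for v in index]
--     first_pos = {}
--     for i, code in enumerate(short_codes):
--         first_pos.setdefault(code, i)
--     entries = [(first_pos[k], f"{k} = {m}") for k, m in col_mapping.items() if m and k in first_pos]
--     entries.sort(key=lambda e: e[0])
--     return short_codes, [line for _, line in entries]
-- ===== Notes on version B (the rewrite author's own statement) =====
-- stated objective: alternative
-- what changed: B inverts the legend loop: instead of A's single fused pass over the index with a running `used` set, B precomputes a first-occurrence position table for the stringified index, scans the MAPPING for keys that are present and truthy, and sorts the collected (position, line) pairs to recover first-occurrence order.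
import Mathlib
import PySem

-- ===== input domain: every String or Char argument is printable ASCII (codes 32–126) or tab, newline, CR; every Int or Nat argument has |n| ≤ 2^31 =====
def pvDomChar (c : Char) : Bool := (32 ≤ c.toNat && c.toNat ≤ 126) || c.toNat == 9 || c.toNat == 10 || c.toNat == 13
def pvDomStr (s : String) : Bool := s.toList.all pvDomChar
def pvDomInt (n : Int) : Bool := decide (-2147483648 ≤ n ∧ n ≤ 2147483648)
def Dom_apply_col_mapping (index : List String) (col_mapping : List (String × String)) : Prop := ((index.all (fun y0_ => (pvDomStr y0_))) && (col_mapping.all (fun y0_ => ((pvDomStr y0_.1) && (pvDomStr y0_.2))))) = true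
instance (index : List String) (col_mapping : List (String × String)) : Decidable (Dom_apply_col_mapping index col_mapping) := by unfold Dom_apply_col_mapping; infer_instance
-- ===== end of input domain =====

-- B inverts the iteration: it scans the mapping (not the index) for legend candidates and restores
-- first-occurrence order by sorting on a precomputed position table; equal return values are proved below.

-- ===== PORT A =====
-- fused single pass: appends each code, and appends a legend line at the first occurrence of a
-- key with a truthy mapping, tracking already-emitted keys in the set `used`
def apply_col_mapping (index : List String) (col_mapping : List (String × String)) : List String × List String :=
  if col_mapping.isEmpty then (index, []) else
    let st := index.foldl (fun (st : List String × List String × PySem.Set String) v =>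
      let code := v  -- str(v) on a str is v
      let sc := st.1 ++ [code]
      match (PySem.Dict.mk col_mapping).get? v with
      | some m =>
        if decide (m ≠ "") && !(PySem.Set.contains st.2.2 v) then
          (sc, st.2.1 ++ [code ++ " = " ++ m], PySem.Set.add st.2.2 v)
        else (sc, st.2.1, st.2.2)
      | none => (sc, st.2.1, st.2.2)) ([], [], (PySem.Set.empty : PySem.Set String))
    (st.1, st.2.1)

-- ===== PORT B =====
-- the first_pos loop of Source B: dict.setdefault over enumerate(short_codes)
def pvFirstPos (short_codes : List String) : PySem.Dict String Int :=
  (PySem.List.enumerate short_codes 0).foldl (fun d p => d.setdefault p.2 p.1) PySem.Dict.empty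

def apply_col_mapping_alt (index : List String) (col_mapping : List (String × String)) : List String × List String :=
  if col_mapping.isEmpty then (index, []) else
    let short_codes := index.map (fun v => v)  -- [str(v) for v in index]
    let first_pos := pvFirstPos short_codes
    -- col_mapping.items(): the distinct keys in insertion order, each with its (first-match) value
    let items := (PySem.List.dedup (col_mapping.map Prod.fst)).map
      (fun k => (k, ((PySem.Dict.mk col_mapping).get? k).getD ""))
    let entries0 := (items.filter (fun p => decide (p.2 ≠ "") && first_pos.contains p.1)).map
      (fun p => (first_pos.getD p.1 0, p.1 ++ " = " ++ p.2))
    let entries := PySem.List.sorted entries0 (fun e => e.1)  -- entries.sort(key=lambda e: e[0])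
    (short_codes, entries.map (fun e => e.2))

-- ===== PRECONDITION & SPEC =====
def Spec_apply_col_mapping (index : List String) (col_mapping : List (String × String)) (out : List String × List String) : Prop := out = apply_col_mapping_alt index col_mapping
instance (index : List String) (col_mapping : List (String × String)) (out : List String × List String) : Decidable (Spec_apply_col_mapping index col_mapping out) := by unfold Spec_apply_col_mapping; infer_instance

-- ===== CLAIM (what is proved, stated in full; the proofs are below) =====
def Claim_equal_apply_col_mapping : Prop := ∀ (index : List String) (col_mapping : List (String × String)), Dom_apply_col_mapping index col_mapping → Spec_apply_col_mapping index col_mapping (apply_col_mapping index col_mapping)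

-- ===== LEMMAS AND PROOFS =====

-- key has a truthy (non-empty) mapping
def pvTruthy (cm : List (String × String)) (key : String) : Bool :=
  decide (((PySem.Dict.mk cm).get? key).getD "" ≠ "")

def pvEntry (cm : List (String × String)) (key : String) : String :=
  key ++ " = " ++ ((PySem.Dict.mk cm).get? key).getD ""

-- the legend A's fused loop produces, given keys already emitted
def pvLegend (cm : List (String × String)) (seen : List String) : List String → List String
  | [] => []
  | v :: xs =>
    if pvTruthy cm v && !(decide (v ∈ seen)) then pvEntry cm v :: pvLegend cm (v :: seen) xs
    else pvLegend cm seen xs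

-- first occurrences of xs not already in seen, in order
def pvDedup (seen : List String) : List String → List String
  | [] => []
  | v :: xs => if v ∈ seen then pvDedup seen xs else v :: pvDedup (v :: seen) xs

theorem pvLegend_congr (cm : List (String × String)) (xs : List String) :
    ∀ s t : List String, (∀ w, w ∈ s ↔ w ∈ t) → pvLegend cm s xs = pvLegend cm t xs := by
  induction xs with
  | nil => intro s t _; rfl
  | cons v xs ih =>
    intro s t h
    simp only [pvLegend, (h v)]
    split
    · exact congrArg _ (ih _ _ (by intro w; simp [h w]))
    · exact ih _ _ h

theorem pvLegend_cons_falsy (cm : List (String × String)) (v : String)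
    (hv : pvTruthy cm v = false) (xs : List String) :
    ∀ seen : List String, pvLegend cm (v :: seen) xs = pvLegend cm seen xs := by
  induction xs with
  | nil => intro _; rfl
  | cons w xs ih =>
    intro seen
    by_cases hwv : w = v
    · subst hwv; simp only [pvLegend, hv, Bool.false_and]; exact ih seen
    · simp only [pvLegend, List.mem_cons]
      have : (w = v ∨ w ∈ seen) ↔ w ∈ seen := by tauto
      simp only [this]
      split
      · refine congrArg _ ?_
        rw [pvLegend_congr cm xs (w :: v :: seen) (v :: w :: seen) (by intro z; simp; tauto)]
        exact ih _
      · exact ih _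

theorem pvLegend_eq_dedup (cm : List (String × String)) (xs : List String) :
    ∀ seen : List String,
      pvLegend cm seen xs = ((pvDedup seen xs).filter (pvTruthy cm)).map (pvEntry cm) := by
  induction xs with
  | nil => intro _; rfl
  | cons v xs ih =>
    intro seen
    by_cases hv : v ∈ seen
    · simp [pvLegend, pvDedup, hv, ih seen]
    · by_cases ht : pvTruthy cm v = true
      · simp [pvLegend, pvDedup, hv, ht, ih (v :: seen), pvEntry]
      · have ht' : pvTruthy cm v = false := by simpa using ht
        rw [show pvLegend cm seen (v :: xs) = pvLegend cm seen xs from by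
              simp [pvLegend, ht'],
            show pvDedup seen (v :: xs) = v :: pvDedup (v :: seen) xs from by
              simp [pvDedup, hv],
            List.filter_cons, if_neg (by simp [ht']),
            ← pvLegend_cons_falsy cm v ht' xs seen, ih (v :: seen)]

-- A's fused loop, characterised
theorem pvFoldA (cm : List (String × String)) (xs : List String) :
    ∀ (sc ll : List String) (used : PySem.Set String),
      xs.foldl (fun (st : List String × List String × PySem.Set String) v =>
        let code := v
        let sc := st.1 ++ [code]
        match (PySem.Dict.mk cm).get? v with
        | some m =>
          if decide (m ≠ "") && !(PySem.Set.contains st.2.2 v) then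
            (sc, st.2.1 ++ [code ++ " = " ++ m], PySem.Set.add st.2.2 v)
          else (sc, st.2.1, st.2.2)
        | none => (sc, st.2.1, st.2.2)) (sc, ll, used)
      = (sc ++ xs, ll ++ pvLegend cm used xs, PySem.Set.update used (xs.filter (pvTruthy cm))) := by
  induction xs with
  | nil => intro sc ll used; simp [pvLegend, PySem.Set.update]
  | cons v xs ih =>
    intro sc ll used
    have hc : PySem.Set.contains used v = decide (v ∈ used) := by
      simp [PySem.Set.contains]
    rw [List.foldl_cons]
    cases hget : (PySem.Dict.mk cm).get? v with
    | none =>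
      have ht : pvTruthy cm v = false := by simp [pvTruthy, hget]
      rw [ih]
      refine Prod.ext (by simp) (Prod.ext ?_ ?_)
      · simp [pvLegend, ht]
      · simp [ht]
    | some m =>
      have ht : pvTruthy cm v = decide (m ≠ "") := by simp [pvTruthy, hget]
      by_cases hm : m = ""
      · have ht' : pvTruthy cm v = false := by simp [ht, hm]
        have hcond : (decide (m ≠ "") && !(PySem.Set.contains used v)) = false := by
          simp [hm]
        simp only [hcond, Bool.false_eq_true]
        rw [ih]
        refine Prod.ext (by simp) (Prod.ext ?_ ?_)
        · simp [pvLegend, ht']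
        · simp [ht']
      · have ht' : pvTruthy cm v = true := by simp [ht, hm]
        by_cases hv : v ∈ used
        · have : (decide (m ≠ "") && !(PySem.Set.contains used v)) = false := by
            simp [hv]
          simp only [this, Bool.false_eq_true]
          rw [ih]
          have hadd : PySem.Set.add used v = used := by
            simp [PySem.Set.add, hv]
          refine Prod.ext (by simp) (Prod.ext ?_ ?_)
          · simp [pvLegend, ht', hv]
          · simp [ht', PySem.Set.update, hadd]
        · have : (decide (m ≠ "") && !(PySem.Set.contains used v)) = true := by
            simp [hv, hm]
          simp only [this, if_true]
          rw [ih]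
          refine Prod.ext (by simp) (Prod.ext ?_ ?_)
          · have : pvEntry cm v = v ++ " = " ++ m := by simp [pvEntry, hget]
            rw [pvLegend_congr cm xs (PySem.Set.add used v) (v :: used)
              (by intro w; simp [PySem.Set.mem_add]; tauto)]
            simp [pvLegend, ht', hv, this]
          · simp [ht', PySem.Set.update]

-- membership in pvDedup
theorem pvDedup_mem_iff (xs : List String) :
    ∀ (seen : List String) (b : String), b ∈ pvDedup seen xs ↔ b ∈ xs ∧ b ∉ seen := by
  induction xs with
  | nil => intro seen b; simp [pvDedup]
  | cons v xs ih =>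
    intro seen b
    by_cases hv : v ∈ seen
    · simp only [pvDedup, if_pos hv, ih, List.mem_cons]
      constructor
      · rintro ⟨h1, h2⟩; exact ⟨Or.inr h1, h2⟩
      · rintro ⟨h1, h2⟩
        rcases h1 with h1 | h1
        · subst h1; exact absurd hv h2
        · exact ⟨h1, h2⟩
    · simp only [pvDedup, if_neg hv, List.mem_cons, ih]
      constructor
      · rintro (h | ⟨h1, h2⟩)
        · subst h; exact ⟨Or.inl rfl, hv⟩
        · exact ⟨Or.inr h1, fun c => h2 (Or.inr c)⟩
      · rintro ⟨h1, h2⟩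
        rcases h1 with h1 | h1
        · exact Or.inl h1
        · by_cases hbv : b = v
          · exact Or.inl hbv
          · exact Or.inr ⟨h1, by simp [hbv, h2]⟩

theorem pvDedup_nodup (xs : List String) : ∀ seen : List String, (pvDedup seen xs).Nodup := by
  induction xs with
  | nil => intro _; simp [pvDedup]
  | cons v xs ih =>
    intro seen
    by_cases hv : v ∈ seen
    · simpa [pvDedup, hv] using ih seen
    · rw [show pvDedup seen (v :: xs) = v :: pvDedup (v :: seen) xs from by simp [pvDedup, hv]]
      refine List.nodup_cons.mpr ⟨?_, ih _⟩
      intro hmem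
      exact ((pvDedup_mem_iff xs (v :: seen) v).mp hmem).2 (List.mem_cons_self)

-- elements of pvDedup come in strictly increasing first-occurrence order
theorem pvDedup_pairwise (xs : List String) :
    ∀ seen : List String, (pvDedup seen xs).Pairwise (fun a b => xs.idxOf a < xs.idxOf b) := by
  induction xs with
  | nil => intro _; simp [pvDedup]
  | cons v xs ih =>
    intro seen
    by_cases hv : v ∈ seen
    · rw [show pvDedup seen (v :: xs) = pvDedup seen xs from by simp [pvDedup, hv]]
      refine (ih seen).imp_of_mem ?_
      intro a b ha hb hab
      have hav : a ≠ v := fun c => ((pvDedup_mem_iff xs seen a).mp ha).2 (c ▸ hv)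
      have hbv : b ≠ v := fun c => ((pvDedup_mem_iff xs seen b).mp hb).2 (c ▸ hv)
      rw [List.idxOf_cons_ne _ (Ne.symm hav), List.idxOf_cons_ne _ (Ne.symm hbv)]
      omega
    · rw [show pvDedup seen (v :: xs) = v :: pvDedup (v :: seen) xs from by simp [pvDedup, hv]]
      refine List.pairwise_cons.mpr ⟨?_, ?_⟩
      · intro b hb
        have hbv : b ≠ v := fun c =>
          ((pvDedup_mem_iff xs (v :: seen) b).mp hb).2 (c ▸ List.mem_cons_self)
        rw [List.idxOf_cons_self, List.idxOf_cons_ne _ (Ne.symm hbv)]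
        omega
      · refine (ih (v :: seen)).imp_of_mem ?_
        intro a b ha hb hab
        have hav : a ≠ v := fun c =>
          ((pvDedup_mem_iff xs (v :: seen) a).mp ha).2 (c ▸ List.mem_cons_self)
        have hbv : b ≠ v := fun c =>
          ((pvDedup_mem_iff xs (v :: seen) b).mp hb).2 (c ▸ List.mem_cons_self)
        rw [List.idxOf_cons_ne _ (Ne.symm hav), List.idxOf_cons_ne _ (Ne.symm hbv)]
        omega

-- the setdefault loop records the FIRST position of each element
theorem pvFirstPos_foldl (k : String) (xs : List String) :
    ∀ (s : Int) (d : PySem.Dict String Int),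
      ((PySem.List.enumerate xs s).foldl (fun d p => d.setdefault p.2 p.1) d).get? k
      = match d.get? k with
        | some v => some v
        | none => if k ∈ xs then some (s + (xs.idxOf k : Int)) else none := by
  induction xs with
  | nil => intro s d; cases h : d.get? k <;> simp [PySem.List.enumerate_nil, h]
  | cons v xs ih =>
    intro s d
    rw [PySem.List.enumerate_cons, List.foldl_cons, ih]
    by_cases hcont : d.contains v
    · have hd : d.setdefault v s = d := by simp [PySem.Dict.setdefault, hcont]
      rw [hd]
      cases hget : d.get? k with
      | some w => rfl
      | none =>
        have hkv : k ≠ v := by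
          intro h; subst h
          rw [PySem.Dict.contains_eq_isSome_get?, hget] at hcont; simp at hcont
        rw [List.idxOf_cons_ne _ (Ne.symm hkv)]
        by_cases hmem : k ∈ xs
        · simp only [List.mem_cons, hmem, or_true, if_pos]
          congr 1
          push_cast
          ring
        · have : ¬ (k ∈ v :: xs) := by simp [hkv, hmem]
          simp [hmem, this]
    · have hnone : d.get? v = none := by
        rw [PySem.Dict.contains_eq_isSome_get?] at hcont
        cases h : d.get? v
        · rfl
        · rw [h] at hcont; simp at hcont
      have hd : d.setdefault v s = d.insert v s := by
        apply PySem.Dict.ext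
        rw [PySem.Dict.items_insert_of_not_contains _ _ (by simpa using hcont)]
        simp [PySem.Dict.setdefault, hcont]
      rw [hd]
      by_cases hkv : k = v
      · subst hkv
        rw [PySem.Dict.get?_insert_self, hnone, List.idxOf_cons_self]
        simp
      · rw [PySem.Dict.get?_insert_of_ne _ _ hkv]
        cases hget : d.get? k with
        | some w => rfl
        | none =>
          rw [List.idxOf_cons_ne _ (Ne.symm hkv)]
          by_cases hmem : k ∈ xs
          · simp only [List.mem_cons, hmem, or_true, if_pos]
            congr 1
            push_cast
            ring
          · have : ¬ (k ∈ v :: xs) := by simp [hkv, hmem]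
            simp [hmem, this]

theorem pvFirstPos_get? (sc : List String) (k : String) :
    (pvFirstPos sc).get? k = if k ∈ sc then some ((sc.idxOf k : Int)) else none := by
  rw [pvFirstPos, pvFirstPos_foldl]
  simp [PySem.Dict.get?_empty]

theorem pvFirstPos_contains (sc : List String) (k : String) :
    (pvFirstPos sc).contains k = decide (k ∈ sc) := by
  rw [PySem.Dict.contains_eq_isSome_get?, pvFirstPos_get?]
  by_cases h : k ∈ sc <;> simp [h]

theorem pvFirstPos_getD (sc : List String) (k : String) (hk : k ∈ sc) :
    (pvFirstPos sc).getD k 0 = (sc.idxOf k : Int) := by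
  rw [PySem.Dict.getD_eq_get?_getD, pvFirstPos_get?, if_pos hk]
  rfl

-- pvTruthy keys are keys of the mapping
theorem pvTruthy_mem_keys (cm : List (String × String)) (k : String)
    (h : pvTruthy cm k = true) : k ∈ cm.map Prod.fst := by
  by_contra hk
  have : (PySem.Dict.mk cm).get? k = none := by
    rw [PySem.Dict.get?_eq_none_iff_not_mem_keys]
    simpa [PySem.Dict.keys] using hk
  simp [pvTruthy, this] at h

-- B's sorted entry list IS the legend list in first-occurrence order
theorem pvSorted_entries (index : List String) (cm : List (String × String)) :
    PySem.List.sorted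
      ((((PySem.List.dedup (cm.map Prod.fst)).map
            (fun k => (k, ((PySem.Dict.mk cm).get? k).getD ""))).filter
          (fun p => decide (p.2 ≠ "") && (pvFirstPos index).contains p.1)).map
        (fun p => ((pvFirstPos index).getD p.1 0, p.1 ++ " = " ++ p.2)))
      (fun e => e.1)
    = ((pvDedup [] index).filter (pvTruthy cm)).map
        (fun k => ((pvFirstPos index).getD k 0, pvEntry cm k)) := by
  set g : String → Int × String := fun k => ((pvFirstPos index).getD k 0, pvEntry cm k) with hg
  have hrw : (((PySem.List.dedup (cm.map Prod.fst)).map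
        (fun k => (k, ((PySem.Dict.mk cm).get? k).getD ""))).filter
      (fun p => decide (p.2 ≠ "") && (pvFirstPos index).contains p.1)).map
      (fun p => ((pvFirstPos index).getD p.1 0, p.1 ++ " = " ++ p.2))
      = ((PySem.List.dedup (cm.map Prod.fst)).filter
          (fun k => pvTruthy cm k && (pvFirstPos index).contains k)).map g := by
    rw [List.filter_map, List.map_map]
    rfl
  rw [hrw]
  apply PySem.List.sorted_eq_of_perm_of_pairwise_lt
  · -- the two key lists are permutations (both Nodup, same membership), hence so are the images
    apply List.Perm.map
    rw [List.perm_ext_iff_of_nodup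
      ((pvDedup_nodup index []).filter _)
      (by rw [PySem.List.dedup_eq_ofList]; exact (PySem.Set.nodup_ofList _).filter _)]
    intro k
    simp only [List.mem_filter, pvDedup_mem_iff, PySem.List.dedup_eq_ofList,
      PySem.Set.mem_ofList, pvFirstPos_contains, Bool.and_eq_true, decide_eq_true_eq]
    constructor
    · rintro ⟨⟨hk, -⟩, ht⟩
      exact ⟨pvTruthy_mem_keys cm k ht, ht, hk⟩
    · rintro ⟨-, ht, hk⟩
      exact ⟨⟨hk, List.not_mem_nil⟩, ht⟩
  · -- … and the right-hand side is strictly increasing in the recorded first position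
    rw [List.pairwise_map]
    refine (((pvDedup_pairwise index []).filter (pvTruthy cm)).imp_of_mem ?_)
    intro a b ha hb hab
    have ha' : a ∈ index := ((pvDedup_mem_iff index [] a).mp (List.mem_of_mem_filter ha)).1
    have hb' : b ∈ index := ((pvDedup_mem_iff index [] b).mp (List.mem_of_mem_filter hb)).1
    simp only [hg, pvFirstPos_getD index a ha', pvFirstPos_getD index b hb']
    exact_mod_cast hab

-- ===== VERDICT (by name: the statement is the Claim_ definition above) =====
theorem apply_col_mapping_spec : Claim_equal_apply_col_mapping := by
  intro index cm _
  unfold Spec_apply_col_mapping apply_col_mapping apply_col_mapping_alt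
  by_cases h : cm.isEmpty
  · simp [h]
  · simp only [h, Bool.false_eq_true, if_false]
    rw [pvFoldA cm index [] [] PySem.Set.empty]
    have hid : index.map (fun v => v) = index := by simp
    simp only [hid, pvSorted_entries index cm]
    rw [List.map_map]
    simp [pvLegend_eq_dedup, PySem.Set.empty]
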